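-- pv_equiv track=rewrite | github.com/dondarrion91/TP2-AED | controles.py | validar_caract_digitos
-- ===== SOURCE A (Python) =====
-- def validar_caract_digitos(direccion):
--     termino_palabra = False
--     todos_digitos = True
--     todos_alfa = True
--     is_valid_direccion = True
--
--     anterior_car = None
--     cant_uppers_palabra = 0
--     cant_todos_digitos = 0
--
--     for car in direccion:
--         if not is_valid_direccion:
--             return False
--
--         if not termino_palabra and (car == " " or car == "."):
--             is_valid_direccion = todos_digitos or todos_alfa
--
--             if todos_digitos:
--                 cant_todos_digitos += 1
--
--             todos_digitos = True
--             todos_alfa = True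
--
--             if car == ".":
--                 termino_palabra = True
--         elif not termino_palabra:
--             if todos_digitos and not car.isdigit():
--                 todos_digitos = False
--
--             if todos_alfa and not car.isalpha():
--                 todos_alfa = False
--
--             if anterior_car is not None:
--                 ant_car_is_alpha = anterior_car.isalpha() and car.isalpha()
--                 dos_uppers_seguidos = anterior_car.upper() == anterior_car and car.upper() == car
--
--                 if ant_car_is_alpha and dos_uppers_seguidos:
--                     cant_uppers_palabra += 1
--
--         anterior_car = car
--
--     return is_valid_direccion and (cant_uppers_palabra == 0) and (cant_todos_digitos >= 1)
-- ===== SOURCE B (Python) =====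
-- def validar_caract_digitos(direccion):
--     dot = direccion.find(".")
--     has_dot = dot >= 0
--     prefix = direccion[:dot] if has_dot else direccion
--     tokens = prefix.split(" ")
--     segments = tokens if has_dot else tokens[:-1]
--     all_valid = all(t == "" or t.isdigit() or t.isalpha() for t in segments)
--     digit_count = sum(1 for t in segments if t == "" or t.isdigit())
--     no_upper_pair = not any(
--         a.isalpha() and b.isalpha() and a.upper() == a and b.upper() == b
--         for a, b in zip(prefix, prefix[1:]))
--     return all_valid and no_upper_pair and digit_count >= 1
-- ===== Notes on version B (the rewrite author's own statement) =====
-- stated objective: simpler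
-- what changed: Replaces A's single stateful character loop (seven mutable flags/counters with early return) by a declarative decomposition: cut the string at the first dot, split the prefix on spaces, validate/count the terminated tokens with all()/sum(), and check adjacent uppercase pairs with zip.
import Mathlib
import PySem

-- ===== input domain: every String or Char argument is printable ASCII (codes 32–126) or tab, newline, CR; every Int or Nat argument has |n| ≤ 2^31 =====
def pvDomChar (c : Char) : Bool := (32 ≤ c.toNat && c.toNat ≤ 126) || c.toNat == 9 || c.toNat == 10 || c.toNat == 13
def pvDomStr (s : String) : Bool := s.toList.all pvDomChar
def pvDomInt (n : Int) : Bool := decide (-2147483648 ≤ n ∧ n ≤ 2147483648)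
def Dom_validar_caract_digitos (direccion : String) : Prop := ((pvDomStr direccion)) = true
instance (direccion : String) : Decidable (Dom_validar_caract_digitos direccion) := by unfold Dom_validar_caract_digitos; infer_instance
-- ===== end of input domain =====

-- B replaces A's single stateful character loop (seven mutable flags/counters with an early
-- return) by a declarative decomposition: cut at the first dot, split the pfx on spaces,
-- validate/count the terminated tokens, and check adjacent uppercase letter pairs via zip.

-- ===== PORT A =====
-- the for-loop of A, state = (termino_palabra, todos_digitos, todos_alfa, is_valid_direccion,
-- anterior_car, cant_uppers_palabra, cant_todos_digitos); 'return False' = early exit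
def validarLoop : List Char → Bool → Bool → Bool → Bool → Option Char → Nat → Nat → Bool
  | [], _, _, _, valid, _, up, cnt => valid && (up == 0) && decide (1 ≤ cnt)
  | c :: rest, termino, td, ta, valid, prev, up, cnt =>
    if !valid then false
    else if !termino && (c == ' ' || c == '.') then
      validarLoop rest (if c == '.' then true else termino) true true (td || ta) (some c) up
        (if td then cnt + 1 else cnt)
    else if !termino then
      validarLoop rest termino
        (if td && !PySem.Chars.isdigit c then false else td)
        (if ta && !PySem.Chars.isalpha c then false else ta)
        valid (some c)
        (match prev with
         | some a =>
           if (PySem.Chars.isalpha a && PySem.Chars.isalpha c)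
              && (PySem.Chars.upperChar a == a && PySem.Chars.upperChar c == c)
           then up + 1 else up
         | none => up)
        cnt
    else
      validarLoop rest termino td ta valid (some c) up cnt

def validar_caract_digitos (direccion : String) : Bool :=
  validarLoop direccion.toList false true true true none 0 0

-- ===== PORT B =====
def validar_caract_digitos_alt (direccion : String) : Bool :=
  let cs := direccion.toList
  let dot := PySem.Chars.find cs ['.']
  let hasDot := decide (0 ≤ dot)
  let pfx := if hasDot then PySem.Chars.slice cs none (some dot) else cs
  let tokens := PySem.Chars.splitOn pfx [' ']
  let segments := if hasDot then tokens else PySem.List.slice tokens none (some (-1))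
  let allValid := segments.all fun t =>
    t.isEmpty || PySem.Chars.strIsdigit t || PySem.Chars.strIsalpha t
  let digitCount := (segments.filter fun t => t.isEmpty || PySem.Chars.strIsdigit t).length
  let noUpperPair := !((pfx.zip (PySem.Chars.slice pfx (some 1) none)).any fun ab =>
    PySem.Chars.isalpha ab.1 && PySem.Chars.isalpha ab.2
      && (PySem.Chars.upperChar ab.1 == ab.1) && (PySem.Chars.upperChar ab.2 == ab.2))
  allValid && noUpperPair && decide (1 ≤ digitCount)

-- ===== PRECONDITION & SPEC =====
def Spec_validar_caract_digitos (direccion : String) (out : Bool) : Prop := out = validar_caract_digitos_alt direccion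
instance (direccion : String) (out : Bool) : Decidable (Spec_validar_caract_digitos direccion out) := by unfold Spec_validar_caract_digitos; infer_instance

-- ===== CLAIM (what is proved, stated in full; the proofs are below) =====
def Claim_equal_validar_caract_digitos : Prop := ∀ (direccion : String), Dom_validar_caract_digitos direccion → Spec_validar_caract_digitos direccion (validar_caract_digitos direccion)

-- ===== LEMMAS AND PROOFS =====

-- spec-level helpers (proof only)
def tokDig (t : List Char) : Bool := t.all PySem.Chars.isdigit
def tokAlf (t : List Char) : Bool := t.all PySem.Chars.isalpha
def tokOk (t : List Char) : Bool := tokDig t || tokAlf t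

def pairBad (a c : Char) : Bool :=
  (PySem.Chars.isalpha a && PySem.Chars.isalpha c)
    && (PySem.Chars.upperChar a == a && PySem.Chars.upperChar c == c)

def pairInc (prev : Option Char) (c : Char) : Nat :=
  match prev with
  | some a => if pairBad a c then 1 else 0
  | none => 0

-- character-level specs of A's loop in the pre-dot regime
def bodyValid : Bool → Bool → List Char → Bool
  | td, ta, [] => true
  | td, ta, c :: rest =>
    if c = '.' then td || ta
    else if c = ' ' then (td || ta) && bodyValid true true rest
    else bodyValid (td && PySem.Chars.isdigit c) (ta && PySem.Chars.isalpha c) rest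

def digitCnt : Bool → List Char → Nat
  | td, [] => 0
  | td, c :: rest =>
    if c = '.' then (if td then 1 else 0)
    else if c = ' ' then (if td then 1 else 0) + digitCnt true rest
    else digitCnt (td && PySem.Chars.isdigit c) rest

def badPairs : Option Char → List Char → Nat
  | prev, [] => 0
  | prev, c :: rest =>
    if c = '.' then 0
    else pairInc prev c + badPairs (some c) rest

def bPairs : List Char → Nat
  | a :: b :: r => (if pairBad a b then 1 else 0) + bPairs (b :: r)
  | _ => 0

-- single-char split, foldr form
def splitCh (sep : Char) : List Char → List (List Char)
  | [] => [[]]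
  | c :: rest =>
    let r := splitCh sep rest
    if c = sep then [] :: r else (c :: r.headI) :: r.tail

lemma splitCh_ne_nil (sep : Char) (l : List Char) : splitCh sep l ≠ [] := by
  cases l with
  | nil => simp [splitCh]
  | cons c rest =>
    simp only [splitCh]
    split <;> simp

-- A's loop after the dot only checks the flags
lemma loopA_termino (l : List Char) (td ta valid : Bool) (prev : Option Char) (up cnt : Nat) :
    validarLoop l true td ta valid prev up cnt = (valid && (up == 0) && decide (1 ≤ cnt)) := by
  induction l generalizing prev with
  | nil => rfl
  | cons c rest ih =>
    simp only [validarLoop]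
    cases valid <;> simp [ih]

-- main invariant of A's loop before the dot
lemma loopA_spec (l : List Char) (td ta valid : Bool) (prev : Option Char) (up cnt : Nat) :
    validarLoop l false td ta valid prev up cnt =
      (valid && bodyValid td ta l && ((up + badPairs prev l) == 0)
        && decide (1 ≤ cnt + digitCnt td l)) := by
  induction l generalizing td ta valid prev up cnt with
  | nil => simp [validarLoop, bodyValid, badPairs, digitCnt]
  | cons c rest ih =>
    cases valid with
    | false => simp [validarLoop]
    | true =>
      by_cases hdot : c = '.'
      · subst hdot
        simp only [validarLoop, Bool.not_true, Bool.false_eq_true, if_false, Bool.not_false,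
          Bool.true_and, BEq.rfl, Bool.or_true, if_pos rfl, if_true]
        rw [loopA_termino]
        simp only [bodyValid, badPairs, digitCnt, if_pos rfl]
        cases td <;> simp [decide_eq_decide] <;> omega
      · by_cases hspace : c = ' '
        · subst hspace
          simp only [validarLoop, Bool.not_true, Bool.false_eq_true, if_false, Bool.not_false,
            Bool.true_and, BEq.rfl, Bool.true_or, if_true,
            (by decide : ((' ' == '.') : Bool) = false)]
          rw [ih]
          simp only [bodyValid, badPairs, digitCnt, if_neg (by decide : ¬(' ' = '.')), if_pos rfl]
          have h0 : pairInc prev ' ' = 0 := by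
            cases prev <;> simp [pairInc, pairBad, PySem.Chars.isalpha,
              PySem.Chars.isupper, PySem.Chars.islower]
          cases td <;> simp [decide_eq_decide, Bool.and_assoc, h0, Nat.add_assoc]
        · have hcond : (c == ' ' || c == '.') = false := by
            simp [hspace, hdot]
          simp only [validarLoop, Bool.not_true, Bool.false_eq_true, if_false, Bool.not_false,
            Bool.true_and, hcond]
          rw [ih]
          have htd : (if td && !PySem.Chars.isdigit c then false else td)
              = (td && PySem.Chars.isdigit c) := by
            cases td <;> cases h : PySem.Chars.isdigit c <;> simp [h]
          have hta : (if ta && !PySem.Chars.isalpha c then false else ta)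
              = (ta && PySem.Chars.isalpha c) := by
            cases ta <;> cases h : PySem.Chars.isalpha c <;> simp [h]
          have hup : (match prev with
              | some a =>
                if (PySem.Chars.isalpha a && PySem.Chars.isalpha c)
                   && (PySem.Chars.upperChar a == a && PySem.Chars.upperChar c == c)
                then up + 1 else up
              | none => up) = up + pairInc prev c := by
            cases prev with
            | none => simp [pairInc]
            | some a =>
              simp only [pairInc, pairBad]
              split <;> simp
          rw [htd, hta, hup]
          simp only [bodyValid, badPairs, digitCnt, if_neg hdot, if_neg hspace]
          simp [Bool.and_assoc, Nat.add_assoc]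

-- token-level characterisation of the spec helpers on a dot-free pfx
lemma bodyValid_dot (p : List Char) (hp : '.' ∉ p) (td ta : Bool) (r : List Char) :
    bodyValid td ta (p ++ '.' :: r) =
      (((td && tokDig (splitCh ' ' p).headI) || (ta && tokAlf (splitCh ' ' p).headI))
        && (splitCh ' ' p).tail.all tokOk) := by
  induction p generalizing td ta with
  | nil => simp [bodyValid, splitCh, tokDig, tokAlf]
  | cons c q ih =>
    simp only [List.mem_cons, not_or] at hp
    have hc := hp.1
    simp only [List.cons_append, bodyValid, if_neg (Ne.symm hc)]
    rcases hsp : splitCh ' ' q with _ | ⟨h', t'⟩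
    · exact absurd hsp (splitCh_ne_nil ' ' q)
    by_cases hspace : c = ' '
    · rw [if_pos hspace, ih hp.2 true true]
      simp [splitCh, hspace, hsp, tokDig, tokAlf, tokOk, Bool.and_assoc]
    · rw [if_neg hspace, ih hp.2]
      simp [splitCh, hsp, if_neg hspace, tokDig, tokAlf, Bool.and_assoc]

lemma bodyValid_nodot (p : List Char) (hp : '.' ∉ p) (td ta : Bool) :
    bodyValid td ta p =
      (if (splitCh ' ' p).tail = [] then true
       else (((td && tokDig (splitCh ' ' p).headI) || (ta && tokAlf (splitCh ' ' p).headI))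
        && (splitCh ' ' p).tail.dropLast.all tokOk)) := by
  induction p generalizing td ta with
  | nil => simp [bodyValid, splitCh]
  | cons c q ih =>
    simp only [List.mem_cons, not_or] at hp
    simp only [bodyValid, if_neg (Ne.symm hp.1)]
    rcases hsp : splitCh ' ' q with _ | ⟨h', t'⟩
    · exact absurd hsp (splitCh_ne_nil ' ' q)
    by_cases hspace : c = ' '
    · rw [if_pos hspace, ih hp.2 true true]
      cases t' with
      | nil => simp [splitCh, hspace, hsp, tokDig, tokAlf, tokOk]
      | cons u us => simp [splitCh, hspace, hsp, tokDig, tokAlf, tokOk, Bool.and_assoc]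
    · rw [if_neg hspace, ih hp.2]
      cases t' with
      | nil => simp [splitCh, hsp, if_neg hspace]
      | cons u us => simp [splitCh, hsp, if_neg hspace, tokDig, tokAlf, Bool.and_assoc]

lemma digitCnt_dot (p : List Char) (hp : '.' ∉ p) (td : Bool) (r : List Char) :
    digitCnt td (p ++ '.' :: r) =
      (if td && tokDig (splitCh ' ' p).headI then 1 else 0)
        + ((splitCh ' ' p).tail.filter tokDig).length := by
  induction p generalizing td with
  | nil => simp [digitCnt, splitCh, tokDig]
  | cons c q ih =>
    simp only [List.mem_cons, not_or] at hp
    simp only [List.cons_append, digitCnt, if_neg (Ne.symm hp.1)]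
    rcases hsp : splitCh ' ' q with _ | ⟨h', t'⟩
    · exact absurd hsp (splitCh_ne_nil ' ' q)
    by_cases hspace : c = ' '
    · rw [if_pos hspace, ih hp.2 true]
      cases htd : tokDig h' <;> cases td <;>
        simp [splitCh, hspace, hsp, htd, tokDig, List.filter_cons] <;> (split <;> simp <;> omega)
    · rw [if_neg hspace, ih hp.2]
      simp [splitCh, hsp, if_neg hspace, tokDig, Bool.and_assoc]

lemma digitCnt_nodot (p : List Char) (hp : '.' ∉ p) (td : Bool) :
    digitCnt td p =
      (if (splitCh ' ' p).tail = [] then 0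
       else (if td && tokDig (splitCh ' ' p).headI then 1 else 0)
        + ((splitCh ' ' p).tail.dropLast.filter tokDig).length) := by
  induction p generalizing td with
  | nil => simp [digitCnt, splitCh]
  | cons c q ih =>
    simp only [List.mem_cons, not_or] at hp
    simp only [digitCnt, if_neg (Ne.symm hp.1)]
    rcases hsp : splitCh ' ' q with _ | ⟨h', t'⟩
    · exact absurd hsp (splitCh_ne_nil ' ' q)
    by_cases hspace : c = ' '
    · rw [if_pos hspace, ih hp.2 true]
      cases t' with
      | nil => simp [splitCh, hspace, hsp, tokDig]
      | cons u us =>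
        cases htd : tokDig h' <;> cases td <;>
          simp [splitCh, hspace, hsp, htd, tokDig, List.filter_cons] <;> (split <;> simp <;> omega)
    · rw [if_neg hspace, ih hp.2]
      cases t' with
      | nil => simp [splitCh, hsp, if_neg hspace]
      | cons u us => simp [splitCh, hsp, if_neg hspace, tokDig, Bool.and_assoc]

lemma badPairs_dot (p : List Char) (hp : '.' ∉ p) (prev : Option Char) (r : List Char) :
    badPairs prev (p ++ '.' :: r) = badPairs prev p := by
  induction p generalizing prev with
  | nil => simp [badPairs]
  | cons c q ih =>
    simp only [List.mem_cons, not_or] at hp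
    simp only [List.cons_append, badPairs, if_neg (Ne.symm hp.1)]
    rw [ih hp.2]

lemma badPairs_eq_bPairs (p : List Char) (hp : '.' ∉ p) :
    badPairs none p = bPairs p := by
  have key : ∀ (l : List Char), '.' ∉ l → ∀ a, badPairs (some a) l = bPairs (a :: l) := by
    intro l
    induction l with
    | nil => intro _ a; simp [badPairs, bPairs]
    | cons b r ih =>
      intro hl a
      simp only [List.mem_cons, not_or] at hl
      simp only [badPairs, if_neg (Ne.symm hl.1), bPairs, pairInc]
      rw [ih hl.2]
  cases p with
  | nil => simp [badPairs, bPairs]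
  | cons c q =>
    simp only [List.mem_cons, not_or] at hp
    simp only [badPairs, if_neg (Ne.symm hp.1), pairInc, Nat.zero_add]
    rw [key q hp.2 c]

lemma bPairs_zip (p : List Char) :
    ((p.zip p.tail).any fun ab => pairBad ab.1 ab.2) = decide (bPairs p ≠ 0) := by
  induction p with
  | nil => simp [bPairs]
  | cons a q ih =>
    cases q with
    | nil => simp [bPairs]
    | cons b r =>
      simp only [List.tail_cons, List.zip_cons_cons, List.any_cons] at *
      rw [ih]
      simp only [bPairs]
      by_cases h : pairBad a b = true <;> simp [h]

-- PySem.Chars.splitOn with a single-char separator is splitCh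
lemma go_single (s : Char) (l : List Char) : ∀ (fuel : Nat) (cur : List Char) (acc : List (List Char)),
    l.length ≤ fuel →
    PySem.Chars.splitOn.go [s] fuel l cur acc
      = acc.reverse ++ (cur.reverse ++ (splitCh s l).headI) :: (splitCh s l).tail := by
  induction l with
  | nil =>
    intro fuel cur acc _
    cases fuel <;> simp [PySem.Chars.splitOn.go, splitCh]
  | cons c rest ih =>
    intro fuel cur acc hf
    cases fuel with
    | zero => simp at hf
    | succ k =>
      rw [PySem.Chars.splitOn.go]
      simp only [List.isPrefixOf, List.length_nil, List.length_cons, Nat.zero_add,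
        List.drop_succ_cons, List.drop_zero, Bool.and_true] at *
      by_cases hc : c = s
      · rw [if_pos (by simp [hc])]
        rw [ih k [] (cur.reverse :: acc) (by omega)]
        rcases hsp : splitCh s rest with _ | ⟨h', t'⟩
        · exact absurd hsp (splitCh_ne_nil s rest)
        · simp [splitCh, hsp, hc]
      · rw [if_neg (by simp; intro h; exact absurd h.symm hc)]
        rw [ih k (c :: cur) acc (by omega)]
        rcases hsp : splitCh s rest with _ | ⟨h', t'⟩
        · exact absurd hsp (splitCh_ne_nil s rest)
        · simp [splitCh, hsp, hc]

lemma splitOn_single (sep : Char) (p : List Char) :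
    PySem.Chars.splitOn p [sep] = splitCh sep p := by
  rw [PySem.Chars.splitOn, go_single sep p (p.length+1) [] [] (by omega)]
  rcases hsp : splitCh sep p with _ | ⟨h', t'⟩
  · exact absurd hsp (splitCh_ne_nil sep p)
  · simp

-- xs[:-1] is dropLast
lemma slice_neg_one {α : Type} (xs : List α) :
    PySem.List.slice xs none (some (-1)) = xs.dropLast := by
  simp [PySem.List.slice, PySem.List.clampIdx]
  rcases xs with _ | ⟨a, t⟩
  · simp
  · have h1 : ((a::t).length : Int) + (-1) = t.length := by simp
    rw [h1]
    simp [List.dropLast_eq_take]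

-- first-dot decomposition of find
lemma single_prefix (a : Char) (l : List Char) : ([a] <+: l) ↔ l.head? = some a := by
  cases l <;> simp [List.cons_prefix_cons, eq_comm]

lemma find_nodot (p : List Char) (hp : '.' ∉ p) :
    PySem.Chars.find p ['.'] < 0 := by
  by_contra h
  push_neg at h
  rw [PySem.Chars.find_nonneg_iff] at h
  exact hp (h.subset (by simp))

lemma find_dot (p : List Char) (hp : '.' ∉ p) (r : List Char) :
    PySem.Chars.find (p ++ '.' :: r) ['.'] = (p.length : Int) := by
  have hnn : 0 ≤ PySem.Chars.find (p ++ '.' :: r) ['.'] := by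
    rw [PySem.Chars.find_nonneg_iff]
    rw [List.singleton_infix_iff]; simp
  obtain ⟨h1, h2⟩ := PySem.Chars.find_spec hnn
  set n := (PySem.Chars.find (p ++ '.' :: r) ['.']).toNat with hn
  rw [single_prefix] at h1
  have hne : n = p.length := by
    by_contra hne
    rcases Nat.lt_or_ge n p.length with hlt | hge
    · rw [List.head?_drop, List.getElem?_append_left hlt] at h1
      have : p[n]? = some '.' := h1
      exact hp (List.mem_of_getElem? this)
    · have hgt : p.length < n := by omega
      apply h2 p.length hgt
      rw [single_prefix, List.head?_drop, List.getElem?_append_right (le_refl _)]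
      simp
  omega

lemma tokOk_eq (t : List Char) :
    (tokDig t || PySem.Chars.strIsalpha t) = tokOk t := by
  cases t <;> simp [PySem.Chars.strIsalpha, tokOk, tokDig, tokAlf]

lemma tokDig_eq (t : List Char) :
    (t.isEmpty || PySem.Chars.strIsdigit t) = tokDig t := by
  cases t <;> simp [PySem.Chars.strIsdigit, tokDig]

lemma pairBad_eq (a b : Char) :
    (PySem.Chars.isalpha a && PySem.Chars.isalpha b
      && (PySem.Chars.upperChar a == a) && (PySem.Chars.upperChar b == b)) = pairBad a b := by
  simp [pairBad, Bool.and_assoc]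

lemma first_dot_split (cs : List Char) (h : '.' ∈ cs) :
    ∃ p r, cs = p ++ '.' :: r ∧ '.' ∉ p := by
  induction cs with
  | nil => simp at h
  | cons c q ih =>
    by_cases hc : c = '.'
    · exact ⟨[], q, by simp [hc], by simp⟩
    · have hq : '.' ∈ q := by
        rcases List.mem_cons.mp h with h1 | h1
        · exact absurd h1.symm hc
        · exact h1
      obtain ⟨p, r, hcs, hp⟩ := ih hq
      exact ⟨c :: p, r, by simp [hcs], by simp [hp]; exact fun he => hc he.symm⟩

-- ===== VERDICT (by name: the statement is the Claim_ definition above) =====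
theorem validar_caract_digitos_spec : Claim_equal_validar_caract_digitos := by
  intro direccion _
  unfold Spec_validar_caract_digitos validar_caract_digitos validar_caract_digitos_alt
  rw [loopA_spec]
  dsimp only
  generalize direccion.toList = cs
  by_cases hin : '.' ∈ cs
  · obtain ⟨p, r, hcs, hp⟩ := first_dot_split cs hin
    subst hcs
    rw [find_dot p hp r]
    simp only [Int.natCast_nonneg, decide_true, if_pos rfl, if_true,
      PySem.Chars.slice_eq_listSlice, PySem.List.slice_to _ (Int.natCast_nonneg _),
      Int.toNat_natCast, List.take_left, splitOn_single]
    rw [bodyValid_dot p hp, digitCnt_dot p hp, badPairs_dot p hp, badPairs_eq_bPairs p hp]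
    rcases hsp : splitCh ' ' p with _ | ⟨h, t⟩
    · exact absurd hsp (splitCh_ne_nil ' ' p)
    simp only [PySem.List.slice_from _ (by omega : (0:Int) ≤ 1), Int.toNat_one, List.drop_one,
      pairBad_eq, bPairs_zip, tokDig_eq, tokOk_eq, List.headI_cons, List.tail_cons,
      List.all_cons, List.filter_cons]
    by_cases hok : tokDig h = true <;> by_cases hbp : bPairs p = 0 <;>
      simp_all [Bool.and_assoc, (show (fun t => tokDig t || tokAlf t) = tokOk from rfl),
        (show (fun t : List Char => tokDig t) = tokDig from rfl), tokOk]
  · have hneg := find_nodot cs hin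
    have hcond : ¬(decide (0 ≤ PySem.Chars.find cs ['.']) = true) := by simp; omega
    rw [if_neg hcond, if_neg hcond, splitOn_single, slice_neg_one]
    rw [bodyValid_nodot cs hin, digitCnt_nodot cs hin, badPairs_eq_bPairs cs hin]
    rcases hsp : splitCh ' ' cs with _ | ⟨h, t⟩
    · exact absurd hsp (splitCh_ne_nil ' ' cs)
    simp only [PySem.Chars.slice_eq_listSlice,
      PySem.List.slice_from _ (by omega : (0:Int) ≤ 1), Int.toNat_one, List.drop_one,
      pairBad_eq, bPairs_zip, tokDig_eq, tokOk_eq, List.headI_cons, List.tail_cons]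
    cases t with
    | nil => simp
    | cons u us =>
      simp only [List.dropLast_cons₂, List.all_cons, List.filter_cons, tokDig_eq,
        if_neg (by simp : ¬(u :: us = []))]
      by_cases hok : tokDig h = true <;> by_cases hbp : bPairs cs = 0 <;>
        simp_all [Bool.and_assoc, (show (fun t => tokDig t || tokAlf t) = tokOk from rfl),
        (show (fun t : List Char => tokDig t) = tokDig from rfl), tokOk]
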